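-- pv_equiv track=rewrite | github.com/ChaBoxxHF/Licence-Informatique | Licence_2/S3/I33/tp1.py | minimum_pos
-- ===== SOURCE A (Python) =====
-- def minimum_pos(L):
--     i=0
--     l=[]
--     min1=L[0]
--     while i<len(L):
--         if min1>L[i]:
--             min1=L[i]
--             l=[i]
--         elif min1==L[i]:
--             l+=[i]
--         i+=1
--     return l
-- ===== SOURCE B (Python) =====
-- def minimum_pos(L):
--     m = L[0]
--     for x in L[1:]:
--         if x < m:
--             m = x
--     return [i for i, x in enumerate(L) if x == m]
-- ===== Notes on version B (the rewrite author's own statement) =====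
-- stated objective: simpler
-- what changed: Replaces A's single interleaved scan maintaining (current min, positions list with restarts) by two plain passes: one loop finding the minimum, then a comprehension collecting its indices.
import Mathlib
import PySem

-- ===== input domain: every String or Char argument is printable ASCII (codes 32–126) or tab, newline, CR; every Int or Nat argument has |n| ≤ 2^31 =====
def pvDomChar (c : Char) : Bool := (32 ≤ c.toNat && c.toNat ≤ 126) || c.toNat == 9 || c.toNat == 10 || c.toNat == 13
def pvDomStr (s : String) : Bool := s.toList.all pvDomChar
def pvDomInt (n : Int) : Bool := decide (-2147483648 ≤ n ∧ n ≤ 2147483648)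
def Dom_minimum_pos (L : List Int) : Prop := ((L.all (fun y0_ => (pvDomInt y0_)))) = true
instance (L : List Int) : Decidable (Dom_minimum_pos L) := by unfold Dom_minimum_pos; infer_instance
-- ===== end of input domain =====

-- B changes the decomposition (two passes instead of one interleaved scan); equivalence on nonempty lists.

-- ===== PORT A =====
-- the while loop of A: index i, current minimum min1, accumulated position list l
def minAGo : List Int → Nat → Int → List Int → List Int
  | [], _, _, acc => acc
  | x :: xs, i, min1, acc =>
    if min1 > x then minAGo xs (i+1) x [(i : Int)]
    else if min1 = x then minAGo xs (i+1) min1 (acc ++ [(i : Int)])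
    else minAGo xs (i+1) min1 acc

def minimum_pos (L : List Int) : List Int :=
  match L with
  | [] => []          -- unreachable under Pre_: Python raises IndexError on the initial element access
  | x :: _ => minAGo L 0 x []

-- ===== PORT B =====
-- first pass: m = L[0]; for x in L[1:]: if x < m: m = x
def minBMin : List Int → Int → Int
  | [], m => m
  | x :: xs, m => minBMin xs (if x < m then x else m)

-- second pass: [i for i, x in enumerate(L) if x == m]
def minBFilter : List Int → Nat → Int → List Int
  | [], _, _ => []
  | x :: xs, i, m => if x = m then (i : Int) :: minBFilter xs (i+1) m else minBFilter xs (i+1) m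

def minimum_pos_alt (L : List Int) : List Int :=
  match L with
  | [] => []          -- unreachable under Pre_: Python raises IndexError on the initial element access
  | x :: xs => minBFilter L 0 (minBMin xs x)

-- ===== PRECONDITION & SPEC =====
-- A reads the first element and raises IndexError on the empty list; Pre_ excludes it.
def Pre_minimum_pos (L : List Int) : Prop := L ≠ []
instance (L : List Int) : Decidable (Pre_minimum_pos L) := by unfold Pre_minimum_pos; infer_instance
def pvWitness_minimum_pos : List Int := [3, 1, 1, 2]

def Spec_minimum_pos (L : List Int) (out : List Int) : Prop := out = minimum_pos_alt L
instance (L : List Int) (out : List Int) : Decidable (Spec_minimum_pos L out) := by unfold Spec_minimum_pos; infer_instance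

-- ===== CLAIM (what is proved, stated in full; the proofs are below) =====
def Claim_equal_minimum_pos : Prop := ∀ (L : List Int), Dom_minimum_pos L → Pre_minimum_pos L → Spec_minimum_pos L (minimum_pos L)

-- ===== LEMMAS AND PROOFS =====
theorem minBMin_le (xs : List Int) (c : Int) : minBMin xs c ≤ c := by
  induction xs generalizing c with
  | nil => simp [minBMin]
  | cons x xs ih =>
    simp only [minBMin]
    split
    · exact le_trans (ih x) (by omega)
    · exact ih c

theorem minAGo_eq (xs : List Int) (i : Nat) (c : Int) (acc : List Int) :
    minAGo xs i c acc =
      (if minBMin xs c = c then acc else []) ++ minBFilter xs i (minBMin xs c) := by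
  induction xs generalizing i c acc with
  | nil => simp [minAGo, minBMin, minBFilter]
  | cons x xs ih =>
    simp only [minAGo, minBMin, minBFilter]
    by_cases h1 : c > x
    · have hx : ¬ c = x := by omega
      have hlt : (if x < c then x else c) = x := by simp [h1]
      rw [if_pos h1, ih]; simp only [hlt]
      have hne : minBMin xs x ≠ c := by have := minBMin_le xs x; omega
      rw [if_neg hne]
      simp only [List.nil_append]
      by_cases h2 : x = minBMin xs x
      · rw [if_pos h2, if_pos h2.symm]; rfl
      · rw [if_neg h2, if_neg (fun h => h2 h.symm)]; rfl
    · rw [if_neg h1]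
      have hnc : (if x < c then x else c) = c := by simp; omega
      simp only [hnc]
      by_cases h2 : c = x
      · rw [if_pos h2, ih]
        by_cases h3 : minBMin xs c = c
        · rw [if_pos h3, if_pos h3, if_pos (by omega : x = minBMin xs c)]
          simp
        · rw [if_neg h3, if_neg h3, if_neg (by omega : ¬ x = minBMin xs c)]
      · rw [if_neg h2, ih]
        have hxne : ¬ x = minBMin xs c := by have := minBMin_le xs c; omega
        rw [if_neg hxne]

-- ===== VERDICT (by name: the statement is the Claim_ definition above) =====
theorem minimum_pos_spec : Claim_equal_minimum_pos := by
  intro L _ hpre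
  unfold Spec_minimum_pos
  match L with
  | [] => exact absurd rfl hpre
  | x :: xs =>
    simp only [minimum_pos, minimum_pos_alt]
    rw [minAGo_eq]
    have h0 : minBMin (x :: xs) x = minBMin xs x := by simp [minBMin]
    rw [h0]
    by_cases h : minBMin xs x = x <;> simp [h]
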